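-- pv_equiv track=rewrite | github.com/RhineEagle/Tennis-simulation | rank-tennis.py | GS_mid_convert
-- ===== SOURCE A (Python) =====
-- def GS_mid_convert(msid):
--     mid = msid[2:]
--     rd = int(mid[0])
--     id = int(mid[1:])
--     base = 0
--     for i in range(7,rd,-1):
--         base = base + 2**(7-i)
--     id = str(id + base)
--     while len(id)<3:
--         id = '0'+id
--     return msid[0:2]+id
-- ===== SOURCE B (Python) =====
-- def GS_mid_convert(msid):
--     rd = int(msid[2])
--     base = 2 ** (7 - rd) - 1 if rd < 8 else 0
--     return msid[:2] + str(int(msid[3:]) + base).rjust(3, '0')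
-- ===== Notes on version B (the rewrite author's own statement) =====
-- stated objective: simpler
-- what changed: Replaces the accumulation loop over range(7,rd,-1) by the closed-form geometric sum 2**(7-rd)-1 (guarded for rd >= 8, where the loop is empty) and the zero-prepending while-loop by a single rjust pad to width 3.
import Mathlib
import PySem

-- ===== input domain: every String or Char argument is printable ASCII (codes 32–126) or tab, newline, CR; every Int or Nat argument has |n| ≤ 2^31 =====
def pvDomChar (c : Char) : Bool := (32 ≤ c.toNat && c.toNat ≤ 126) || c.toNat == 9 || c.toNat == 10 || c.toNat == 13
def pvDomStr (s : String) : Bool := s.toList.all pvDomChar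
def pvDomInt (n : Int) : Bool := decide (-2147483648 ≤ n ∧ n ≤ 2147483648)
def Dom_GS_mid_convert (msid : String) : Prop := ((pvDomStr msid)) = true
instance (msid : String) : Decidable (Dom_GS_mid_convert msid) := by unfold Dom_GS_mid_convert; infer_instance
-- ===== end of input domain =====

-- B replaces A's accumulation loop over range(7,rd,-1) by the closed form 2^(7-rd)-1
-- (guarded for rd >= 8) and the zero-prepending while-loop by a single rjust pad (objective: simpler).

-- ===== PORT A =====
-- while len(id) < 3: id = '0' + id
def padA (s : List Char) : List Char :=
  if s.length < 3 then padA ('0' :: s) else s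
termination_by 3 - s.length

def GS_mid_convert (msid : String) : String :=
  let m := msid.toList
  let mid := PySem.List.slice m (some 2) none            -- mid = msid[2:]
  match PySem.List.pyGet? mid 0 with                      -- mid[0] (IndexError outside Pre_)
  | none => ""
  | some c0 =>
    match PySem.Int.ofChars? [c0] with                    -- rd = int(mid[0])
    | none => ""
    | some rd =>
      match PySem.Int.ofChars? (PySem.List.slice mid (some 1) none) with  -- id = int(mid[1:])
      | none => ""
      | some id0 =>
        let base : Int :=
          (PySem.List.pyRange 7 rd (-1)).foldl (fun b i => b + 2 ^ ((7 : Int) - i).toNat) 0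
        let idc := PySem.Int.toChars (id0 + base)         -- id = str(id + base)
        String.ofList (PySem.List.slice m none (some 2) ++ padA idc)  -- msid[0:2] + id

-- ===== PORT B =====
def GS_mid_convert_alt (msid : String) : String :=
  let m := msid.toList
  match PySem.List.pyGet? m 2 with                        -- msid[2]
  | none => ""
  | some c =>
    match PySem.Int.ofChars? [c] with                     -- rd = int(msid[2])
    | none => ""
    | some rd =>
      let base : Int := if rd < 8 then 2 ^ ((7 - rd).toNat) - 1 else 0
      match PySem.Int.ofChars? (PySem.List.slice m (some 3) none) with   -- int(msid[3:])
      | none => ""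
      | some n =>
        let s := PySem.Int.toChars (n + base)
        -- str.rjust(3, '0')
        String.ofList (PySem.List.slice m none (some 2) ++ (List.replicate (3 - s.length) '0' ++ s))

-- ===== PRECONDITION & SPEC =====
-- Exactly the inputs where Python A returns: at least 3 characters, msid[2] parses as an
-- int (a digit), and msid[3:] parses as an int; elsewhere A raises IndexError/ValueError.
def Pre_GS_mid_convert (msid : String) : Prop :=
  2 < msid.toList.length ∧
  (PySem.Int.ofChars? [msid.toList.getD 2 ' ']).isSome = true ∧
  (PySem.Int.ofChars? (msid.toList.drop 3)).isSome = true
instance (msid : String) : Decidable (Pre_GS_mid_convert msid) := by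
  unfold Pre_GS_mid_convert; infer_instance
def pvWitness_GS_mid_convert : String := "AB123"

def Spec_GS_mid_convert (msid : String) (out : String) : Prop := out = GS_mid_convert_alt msid
instance (msid : String) (out : String) : Decidable (Spec_GS_mid_convert msid out) := by
  unfold Spec_GS_mid_convert; infer_instance

-- ===== CLAIM (what is proved, stated in full; the proofs are below) =====
def Claim_equal_GS_mid_convert : Prop := ∀ (msid : String), Dom_GS_mid_convert msid → Pre_GS_mid_convert msid → Spec_GS_mid_convert msid (GS_mid_convert msid)

-- ===== LEMMAS AND PROOFS =====

-- A's loop base = the closed form, for every Int rd.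
lemma base_closed (rd : Int) :
    (PySem.List.pyRange 7 rd (-1)).foldl (fun b i => b + 2 ^ ((7 : Int) - i).toNat) (0 : Int)
      = (if rd < 8 then 2 ^ ((7 - rd).toNat) - 1 else 0 : Int) := by
  have key : ∀ n : Nat, ((List.range n).map (fun k => (7:Int) + -(k:Nat))).foldl
      (fun b i => b + 2 ^ ((7 : Int) - i).toNat) (0 : Int) = 2 ^ n - 1 := by
    intro n
    induction n with
    | zero => simp
    | succ n ih =>
      rw [List.range_succ, List.map_append, List.foldl_append, ih]
      simp [pow_succ]
      ring
  unfold PySem.List.pyRange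
  norm_num
  by_cases h7 : rd < 7
  · rw [if_pos h7, key, if_pos (by omega : rd < 8)]
  · rw [if_neg h7]
    have h0 : (7 - rd).toNat = 0 := by omega
    split_ifs <;> simp [h0]

lemma padA_lt (s : List Char) (h : s.length < 3) : padA s = padA ('0' :: s) := by
  rw [padA, if_pos h]
lemma padA_ge (s : List Char) (h : ¬ s.length < 3) : padA s = s := by
  rw [padA, if_neg h]

-- A's padding loop = replicate-pad to width 3 (B's rjust).
lemma padA_eq (s : List Char) : padA s = List.replicate (3 - s.length) '0' ++ s := by
  rcases s with _ | ⟨a, _ | ⟨b, _ | ⟨c, t⟩⟩⟩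
  · rw [padA_lt _ (by simp), padA_lt _ (by simp), padA_lt _ (by simp), padA_ge _ (by simp)]
    rfl
  · rw [padA_lt _ (by simp), padA_lt _ (by simp), padA_ge _ (by simp)]
    rfl
  · rw [padA_lt _ (by simp), padA_ge _ (by simp)]
    rfl
  · rw [padA_ge _ (by simp)]
    simp

theorem GS_mid_convert_spec : Claim_equal_GS_mid_convert := by
  intro msid _ _
  simp only [Spec_GS_mid_convert, GS_mid_convert, GS_mid_convert_alt]
  have hs2 : PySem.List.slice msid.toList (some 2) none = msid.toList.drop 2 :=
    PySem.List.slice_from _ (by norm_num)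
  have hs3 : PySem.List.slice msid.toList (some 3) none = msid.toList.drop 3 :=
    PySem.List.slice_from _ (by norm_num)
  have hg : PySem.List.pyGet? (msid.toList.drop 2) 0 = PySem.List.pyGet? msid.toList 2 := by
    have h0 := PySem.List.pyGet?_natCast (msid.toList.drop 2) 0
    have h2 := PySem.List.pyGet?_natCast msid.toList 2
    norm_num at h0 h2
    rw [h0, h2]
  have hs1 : PySem.List.slice (msid.toList.drop 2) (some 1) none = msid.toList.drop 3 := by
    rw [PySem.List.slice_from _ (by norm_num)]
    simp [List.drop_drop]
  simp only [hs2, hs1, hs3, hg]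
  cases PySem.List.pyGet? msid.toList 2 with
  | none => rfl
  | some c =>
    dsimp only
    cases PySem.Int.ofChars? [c] with
    | none => rfl
    | some rd =>
      dsimp only
      cases PySem.Int.ofChars? (msid.toList.drop 3) with
      | none => rfl
      | some n =>
        dsimp only
        rw [base_closed, padA_eq]

-- ===== VERDICT =====
-- (verdict is the theorem above)
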